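-- pv_equiv track=rewrite | github.com/Jennie421/6.009 | quiz2/quiz.py | nonrepeating_sequences
-- ===== SOURCE A (Python) =====
-- def verify(seq):
--     for l in range(1, len(seq) // 2 + 1):
--         if seq[-l:] == seq[-2 * l:-l]: # 这里如果有必要还可以优化
--             return False
--     return True
--
-- def nonrepeating_sequences(L, vals):
--     """
--     >>> set(nonrepeating_sequences(1, 'abc')) == {('a',), ('b',), ('c',)}
--     True
--     >>> x = {('a', 'c'), ('c', 'a'), ('a', 'b'), ('b', 'c'), ('c', 'b'), ('b', 'a')}
--     >>> set(nonrepeating_sequences(2, 'abc')) == x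
--     True
--     >>> len(set(nonrepeating_sequences(4, 'abc')))
--     18
--     >>> set(nonrepeating_sequences(3, 'ab')) == {('a', 'b', 'a'), ('b', 'a', 'b')}
--     True
--     >>> set(nonrepeating_sequences(4, 'ab'))
--     set()
--     """
--
--     if L == 0:
--         yield ()
--         return
--
--     for subseq in nonrepeating_sequences(L-1, vals):
--         for item in vals:
--             if verify(subseq + (item,)):
--                 yield subseq + (item,)
-- ===== SOURCE B (Python) =====
-- def nonrepeating_sequences(L, vals):
--     # Iterative level-by-level construction; sequences are stored REVERSED
--     # (newest element first), so "repeated suffix block" becomes "repeated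
--     # prefix block" of the stored tuple; un-reverse at the end.
--     level = [()]
--     for _ in range(L):
--         nxt = []
--         for r in level:
--             for c in vals:
--                 t = (c,) + r
--                 if all(t[:l] != t[l:2 * l] for l in range(1, len(t) // 2 + 1)):
--                     nxt.append(t)
--         level = nxt
--     return [t[::-1] for t in level]
-- ===== Notes on version B (the rewrite author's own statement) =====
-- stated objective: alternative
-- what changed: Replaces A's recursive generator with negative-slice suffix-square testing by an iterative level-by-level construction that stores each sequence reversed (newest element first) and tests repeated prefix blocks with an any/all scan, un-reversing once at the end; Pre_ excludes L < 0, where A's unbounded recursion raises RecursionError.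
import Mathlib
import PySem

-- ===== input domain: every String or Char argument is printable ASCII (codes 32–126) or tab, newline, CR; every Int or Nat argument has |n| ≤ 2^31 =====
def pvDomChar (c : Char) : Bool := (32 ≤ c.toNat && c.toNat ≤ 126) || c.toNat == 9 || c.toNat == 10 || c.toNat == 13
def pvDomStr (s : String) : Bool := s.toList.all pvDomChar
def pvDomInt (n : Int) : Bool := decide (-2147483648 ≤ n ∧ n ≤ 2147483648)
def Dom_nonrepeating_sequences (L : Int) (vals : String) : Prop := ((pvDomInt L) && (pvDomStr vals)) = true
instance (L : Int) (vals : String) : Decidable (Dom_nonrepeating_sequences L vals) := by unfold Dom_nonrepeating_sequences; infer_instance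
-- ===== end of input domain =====

-- B replaces A's recursive generator + negative-slice suffix test by an iterative
-- level-by-level construction that stores each sequence reversed (newest element
-- first) and tests repeated prefix blocks, un-reversing once at the end (objective: alternative).

-- ===== PORT A =====
-- verify(seq): for l in range(1, len(seq)//2+1): if seq[-l:] == seq[-2*l:-l]: return False; return True
def pvVerify (seq : List String) : Bool :=
  (PySem.List.pyRange 1 (PySem.Int.floordiv (seq.length : Int) 2 + 1) 1).all
    (fun l => !(PySem.List.slice seq (some (-l)) none == PySem.List.slice seq (some (-(2*l))) (some (-l))))

-- the generator's recursion, on L.toNat (Python A raises RecursionError for L < 0; excluded by Pre_)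
def pvAuxA : Nat → List String → List (List String)
  | 0, _ => [[]]
  | n+1, items =>
      (pvAuxA n items).flatMap (fun s =>
        items.filterMap (fun c => if pvVerify (s ++ [c]) then some (s ++ [c]) else none))

def nonrepeating_sequences (L : Int) (vals : String) : List (List String) :=
  pvAuxA L.toNat (vals.toList.map (fun c => String.ofList [c]))

-- ===== PORT B =====
-- all(t[:l] != t[l:2*l] for l in range(1, len(t)//2 + 1))  on the stored (reversed) tuple t
def pvOkRev (t : List String) : Bool :=
  (PySem.List.pyRange 1 (PySem.Int.floordiv (t.length : Int) 2 + 1) 1).all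
    (fun l => !(PySem.List.slice t none (some l) == PySem.List.slice t (some l) (some (2*l))))

def nonrepeating_sequences_alt (L : Int) (vals : String) : List (List String) :=
  let items := vals.toList.map (fun c => String.ofList [c])
  let level := (PySem.List.pyRange 0 L 1).foldl
    (fun level _ =>
      level.foldl (fun nxt r =>
        items.foldl (fun nxt c =>
          if pvOkRev (c :: r) then nxt ++ [c :: r] else nxt) nxt) [])
    [[]]
  level.map (fun t => (PySem.List.slice? t none none (-1)).getD [])

-- ===== PRECONDITION & SPEC =====
-- Pre_ excludes L < 0, where Python A's unbounded recursion raises RecursionError.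
def Pre_nonrepeating_sequences (L : Int) (vals : String) : Prop := 0 ≤ L
instance (L : Int) (vals : String) : Decidable (Pre_nonrepeating_sequences L vals) := by
  unfold Pre_nonrepeating_sequences; infer_instance
def pvWitness_nonrepeating_sequences : Int × String := (3, "ab")

def Spec_nonrepeating_sequences (L : Int) (vals : String) (out : List (List String)) : Prop := out = nonrepeating_sequences_alt L vals
instance (L : Int) (vals : String) (out : List (List String)) : Decidable (Spec_nonrepeating_sequences L vals out) := by unfold Spec_nonrepeating_sequences; infer_instance

-- ===== CLAIM (what is proved, stated in full; the proofs are below) =====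
def Claim_equal_nonrepeating_sequences : Prop := ∀ (L : Int) (vals : String), Dom_nonrepeating_sequences L vals → Pre_nonrepeating_sequences L vals → Spec_nonrepeating_sequences L vals (nonrepeating_sequences L vals)

-- ===== LEMMAS AND PROOFS =====

theorem pv_beq_reverse (a b : List String) : (a.reverse == b.reverse) = (a == b) := by
  simp [Bool.beq_eq_decide_eq]

-- A's negative-slice suffix-block test on a sequence equals B's prefix-block test on its reverse.
theorem pvVerify_eq_okRev_reverse (t : List String) : pvVerify t = pvOkRev t.reverse := by
  unfold pvVerify pvOkRev
  rw [List.length_reverse]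
  rw [Bool.eq_iff_iff]
  simp only [List.all_eq_true]
  have point : ∀ l ∈ PySem.List.pyRange 1 (PySem.Int.floordiv (t.length : Int) 2 + 1) 1,
      (!(PySem.List.slice t (some (-l)) none == PySem.List.slice t (some (-(2*l))) (some (-l))))
      = (!(PySem.List.slice t.reverse none (some l) == PySem.List.slice t.reverse (some l) (some (2*l)))) := by
    intro l hl
    have hfd : PySem.Int.floordiv ((t.length : Int)) 2 = ((t.length / 2 : Nat) : Int) := by
      exact_mod_cast PySem.Int.floordiv_natCast t.length 2
    rw [hfd] at hl
    have hb := (PySem.List.mem_pyRange_one).1 hl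
    set n := t.length with hn
    obtain ⟨h1, h2⟩ := hb
    have hk : l = ((l.toNat : Nat) : Int) := by omega
    set k := l.toNat with hkdef
    have hk1 : 1 ≤ k := by omega
    have hk2 : 2 * k ≤ n := by omega
    rw [hk]
    have e1 : PySem.List.slice t (some (-(k : Int))) none = t.drop (n - k) := by
      rw [PySem.List.slice_from_neg_natCast t k (by omega)]
    have e2 : PySem.List.slice t (some (-(2 * (k : Int)))) (some (-(k : Int)))
        = (t.drop (n - 2 * k)).take k := by
      have : (-(2 * (k : Int))) = -((2 * k : Nat) : Int) := by push_cast; ring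
      rw [this]
      simp only [PySem.List.slice, PySem.List.clampIdx_neg_natCast _ _ (by omega : 0 < 2 * k),
        PySem.List.clampIdx_neg_natCast _ _ (by omega : 0 < k)]
      rw [← hn]
      congr 1
      omega
    have e3 : PySem.List.slice t.reverse none (some (k : Int)) = (t.drop (n - k)).reverse := by
      rw [PySem.List.slice_to_natCast, List.take_reverse, hn]
    have e4 : PySem.List.slice t.reverse (some (k : Int)) (some (2 * (k : Int)))
        = ((t.drop (n - 2 * k)).take k).reverse := by
      have : (2 * (k : Int)) = ((2 * k : Nat) : Int) := by push_cast; ring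
      rw [this, PySem.List.slice_natCast, List.drop_reverse, List.take_reverse]
      have hX : (List.take (t.length - k) t).length - (2 * k - k) = n - 2 * k := by
        simp only [List.length_take]; rw [← hn]; omega
      rw [hX, List.drop_take]
      have h5 : t.length - k - (n - 2 * k) = k := by rw [← hn]; omega
      rw [h5]
    rw [e1, e2, e3, e4, pv_beq_reverse]
  constructor <;> intro H l hl
  · rw [← point l hl]; exact H l hl
  · rw [point l hl]; exact H l hl

theorem pv_filterMap_if (items : List String) (p : String → Bool) (f : String → List String) :
    items.filterMap (fun c => if p c then some (f c) else none) = (items.filter p).map f := by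
  induction items with
  | nil => rfl
  | cons c cs ih =>
    simp only [List.filterMap_cons, List.filter_cons]
    by_cases h : p c <;> simp [h, ih]

-- B's nested append loops, in flatMap form
theorem pv_stepB (items : List String) (lv : List (List String)) :
    lv.foldl (fun nxt r =>
      items.foldl (fun nxt c =>
        if pvOkRev (c :: r) then nxt ++ [c :: r] else nxt) nxt) []
    = lv.flatMap (fun r => (items.filter (fun c => pvOkRev (c :: r))).map (fun c => c :: r)) := by
  have inner : ∀ (nxt : List (List String)) (r : List String),
      items.foldl (fun nxt c => if pvOkRev (c :: r) then nxt ++ [c :: r] else nxt) nxt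
      = nxt ++ (items.filter (fun c => pvOkRev (c :: r))).map (fun c => c :: r) := by
    intro nxt r
    exact PySem.List.foldl_append_if (fun c => pvOkRev (c :: r)) (fun c => c :: r) items nxt
  calc lv.foldl (fun nxt r =>
          items.foldl (fun nxt c => if pvOkRev (c :: r) then nxt ++ [c :: r] else nxt) nxt) []
      = lv.foldl (fun nxt r =>
          nxt ++ (items.filter (fun c => pvOkRev (c :: r))).map (fun c => c :: r)) [] := by
        apply List.foldl_ext
        intro acc r _
        exact inner acc r
    _ = _ := by
        rw [PySem.List.foldl_append_eq_flatMap]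
        simp

-- B's level k holds exactly A's level-k sequences, each reversed.
theorem pvLevels (n : Nat) (items : List String) :
    (List.range n).foldl
      (fun level _ =>
        level.foldl (fun nxt r =>
          items.foldl (fun nxt c =>
            if pvOkRev (c :: r) then nxt ++ [c :: r] else nxt) nxt) []) [[]]
    = (pvAuxA n items).map List.reverse := by
  induction n with
  | zero => rfl
  | succ m ih =>
    rw [List.range_succ, List.foldl_append, ih]
    rw [List.foldl_cons, List.foldl_nil, pv_stepB, List.flatMap_map]
    conv_rhs => rw [pvAuxA]
    rw [List.map_flatMap]
    apply List.flatMap_congr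
    intro s _
    rw [pv_filterMap_if, List.map_map]
    have hf : items.filter (fun c => pvOkRev (c :: s.reverse))
        = items.filter (fun c => pvVerify (s ++ [c])) := by
      apply List.filter_congr
      intro c _
      rw [pvVerify_eq_okRev_reverse]
      simp
    rw [hf]
    apply List.map_congr_left
    intro c _
    simp

-- ===== VERDICT (by name: the statement is the Claim_ definition above) =====
theorem nonrepeating_sequences_spec : Claim_equal_nonrepeating_sequences := by
  intro L vals _ hpre
  unfold Spec_nonrepeating_sequences nonrepeating_sequences nonrepeating_sequences_alt
  dsimp only
  have hR : PySem.List.pyRange 0 L 1 = (List.range L.toNat).map (fun k : Nat => ((0 : Int) + (k : Int))) := by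
    rw [PySem.List.pyRange_one]
    norm_num
  rw [hR, List.foldl_map, pvLevels L.toNat (vals.toList.map (fun c => String.ofList [c]))]
  rw [List.map_map]
  apply Eq.symm
  apply List.map_id''
  intro t
  simp [PySem.List.slice?_none_none_neg_one]
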